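-- pv_equiv track=rewrite | github.com/pypi-data/pypi-mirror-361 | packages/quaestor/quaestor-0.2.4-py3-none-any.whl/quaestor/converters.py | _format_actions_section
-- ===== SOURCE A (Python) =====
-- def _section_wrapper(section_id: str, title: str) -> str:
--     """Create section wrapper with title."""
--     return f"\n<!-- SECTION:{section_id}:START -->\n## {title}\n\n"
--
-- def _yaml_block(block_id: str, data: dict) -> str:
--     """Create a YAML data block."""
--     result = f"<!-- DATA:{block_id}:START -->\n```yaml\n"
--
--     def format_value(value, indent=""):
--         if isinstance(value, list):
--             output = ""
--             for item in value:
--                 if isinstance(item, dict):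
--                     output += f"{indent}- "
--                     first = True
--                     for k, v in item.items():
--                         if first:
--                             if isinstance(v, list | dict):
--                                 output += f"{k}:\n"
--                                 output += format_value(v, indent + "  ")
--                             else:
--                                 output += f'{k}: "{v}"\n'
--                             first = False
--                         else:
--                             if isinstance(v, list | dict):
--                                 output += f"{indent}  {k}:\n"
--                                 output += format_value(v, indent + "    ")
--                             else:
--                                 output += f'{indent}  {k}: "{v}"\n'
--                 else:
--                     output += f'{indent}- "{item}"\n'
--             return output
--         elif isinstance(value, dict):
--             output = ""
--             for k, v in value.items():
--                 if isinstance(v, list | dict):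
--                     output += f"{indent}{k}:\n"
--                     output += format_value(v, indent + "  ")
--                 else:
--                     output += f'{indent}{k}: "{v}"\n'
--             return output
--         else:
--             return f'"{value}"\n'
--
--     for key, value in data.items():
--         result += f"{key}:\n" if isinstance(value, list | dict) else f"{key}: "
--         result += format_value(value, "  ")
--
--     result += "```\n<!-- DATA:" + block_id + ":END -->\n"
--     return result
--
-- def _format_actions_section(title: str, content: list[str]) -> str:
--     """Format next actions section."""
--     result = _section_wrapper("memory:actions", title)
--
--     # Extract action items
--     actions = {"immediate": [], "short_term": [], "long_term": []}
--     current_timeframe = None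
--     timeframe_map = {"immediate": "This Week", "short_term": "Next 2 Weeks", "long_term": "Next Month"}
--
--     for line in content:
--         if any(term in line for term in ["Immediate", "This Week"]):
--             current_timeframe = "immediate"
--         elif any(term in line for term in ["Short Term", "Next 2 Weeks"]):
--             current_timeframe = "short_term"
--         elif any(term in line for term in ["Long Term", "Next Month"]):
--             current_timeframe = "long_term"
--         elif current_timeframe and line.strip():
--             # Extract tasks that start with common prefixes
--             task = line.strip()
--             for prefix in ["1.", "2.", "3.", "-", "•", "⬜"]:
--                 if task.startswith(prefix):
--                     task = task[len(prefix) :].strip()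
--                     break
--             if task and not any(task.startswith(p) for p in ["1.", "2.", "3.", "-", "•", "⬜"]):
--                 actions[current_timeframe].append(task)
--
--     if any(actions.values()):
--         action_data = {}
--         for tf, tasks in actions.items():
--             if tasks:
--                 action_data[tf] = {
--                     "timeframe": timeframe_map[tf],
--                     "tasks": [{"id": f"{tf}_{i + 1}", "task": t} for i, t in enumerate(tasks)],
--                 }
--         result += _yaml_block("next-actions", {"actions": action_data}) + "\n"
--
--     return result + "\n".join(content) + "\n<!-- SECTION:memory:actions:END -->\n"
-- ===== SOURCE B (Python) =====
-- # B: two-pass decomposition (segment content by timeframe headers, then extract tasks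
-- # per segment) and direct specialized YAML emission instead of the generic recursive
-- # dict/list walker; same output as A. Objective: simpler/alternative decomposition.
--
-- _KEYWORDS = [
--     ("immediate", ("Immediate", "This Week")),
--     ("short_term", ("Short Term", "Next 2 Weeks")),
--     ("long_term", ("Long Term", "Next Month")),
-- ]
-- _PREFIXES = ["1.", "2.", "3.", "-", "\u2022", "\u2b1c"]
-- _TIMEFRAME_NAMES = {"immediate": "This Week", "short_term": "Next 2 Weeks", "long_term": "Next Month"}
--
--
-- def _classify(line):
--     for key, kws in _KEYWORDS:
--         if any(k in line for k in kws):
--             return key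
--     return None
--
--
-- def _extract(line):
--     t = line.strip()
--     for p in _PREFIXES:
--         if t.startswith(p):
--             t = t[len(p):].strip()
--             break
--     if t and not any(t.startswith(p) for p in _PREFIXES):
--         return t
--     return None
--
--
-- def _format_actions_section(title: str, content: list[str]) -> str:
--     # pass 1: segmentation into (timeframe, [body lines]) runs; pre-header lines dropped
--     segments = []
--     cur = None
--     for line in content:
--         tf = _classify(line)
--         if tf is not None:
--             if cur is not None:
--                 segments.append(cur)
--             cur = (tf, [])
--         elif cur is not None:
--             cur = (cur[0], cur[1] + [line])
--     if cur is not None: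
--         segments.append(cur)
--     # pass 2: extract tasks per segment, grouped by timeframe
--     actions = {"immediate": [], "short_term": [], "long_term": []}
--     for tf, lines in segments:
--         for line in lines:
--             t = _extract(line)
--             if t is not None:
--                 actions[tf].append(t)
--     # emit
--     out = f"\n<!-- SECTION:memory:actions:START -->\n## {title}\n\n"
--     if any(actions.values()):
--         out += "<!-- DATA:next-actions:START -->\n```yaml\nactions:\n"
--         for tf in ("immediate", "short_term", "long_term"):
--             tasks = actions[tf]
--             if tasks:
--                 out += f'  {tf}:\n    timeframe: "{_TIMEFRAME_NAMES[tf]}"\n    tasks:\n'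
--                 for i, t in enumerate(tasks):
--                     out += f'      - id: "{tf}_{i + 1}"\n        task: "{t}"\n'
--         out += "```\n<!-- DATA:next-actions:END -->\n\n"
--     return out + "\n".join(content) + "\n<!-- SECTION:memory:actions:END -->\n"
-- ===== Notes on version B (the rewrite author's own statement) =====
-- stated objective: alternative
-- what changed: Replaces A's single register-driven loop (current_timeframe mutated while scanning) by a two-pass decomposition -- first segment the content into (timeframe, body-lines) runs, then extract tasks per segment -- and replaces A's generic recursive dict/list YAML walker by direct emission of the known fixed YAML shape.
import Mathlib
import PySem

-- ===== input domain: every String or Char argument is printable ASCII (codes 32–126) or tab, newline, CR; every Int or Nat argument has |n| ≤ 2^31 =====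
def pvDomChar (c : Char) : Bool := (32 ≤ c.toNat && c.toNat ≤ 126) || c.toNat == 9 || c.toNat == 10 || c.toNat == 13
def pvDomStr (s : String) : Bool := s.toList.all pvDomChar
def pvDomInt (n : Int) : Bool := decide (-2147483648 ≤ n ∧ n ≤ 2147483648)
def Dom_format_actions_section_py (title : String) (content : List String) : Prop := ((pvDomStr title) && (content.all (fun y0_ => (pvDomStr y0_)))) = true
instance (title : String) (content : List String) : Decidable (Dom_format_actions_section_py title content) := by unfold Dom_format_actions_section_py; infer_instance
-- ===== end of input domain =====

-- B re-decomposes A's single register-driven loop into a segmentation pass plus a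
-- per-segment extraction pass, and emits the YAML block directly for its known shape
-- instead of A's generic recursive dict/list walker; return values are proved equal.

-- ===== PORT A =====
-- A's timeframe register: current_timeframe ∈ {None, "immediate", "short_term", "long_term"}
inductive PvTF | imm | short | long
deriving DecidableEq, Repr

-- both Pythons contain this identical first-matching-prefix strip loop (A inline, B in _extract)
def pvStripFirst (t : String) : List String → String
  | [] => t
  | p :: ps =>
    if PySem.Str.startswith t p then
      PySem.Str.strip (PySem.Str.slice t (some (PySem.Str.len p)) none)
    else pvStripFirst t ps

def pvPrefixes : List String := ["1.", "2.", "3.", "-", "•", "⬜"]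

-- actions dict {"immediate": [], "short_term": [], "long_term": []} as a triple (fixed keys)
def pvPush (tf : PvTF) (task : String)
    (acc : List String × List String × List String) :
    List String × List String × List String :=
  match tf with
  | .imm => (acc.1 ++ [task], acc.2.1, acc.2.2)
  | .short => (acc.1, acc.2.1 ++ [task], acc.2.2)
  | .long => (acc.1, acc.2.1, acc.2.2 ++ [task])

-- A's single for-loop over content with the current_timeframe register
def pvLoopA (cur : Option PvTF) (acc : List String × List String × List String) :
    List String → List String × List String × List String
  | [] => acc
  | line :: rest =>
    if PySem.Str.isIn "Immediate" line || PySem.Str.isIn "This Week" line then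
      pvLoopA (some .imm) acc rest
    else if PySem.Str.isIn "Short Term" line || PySem.Str.isIn "Next 2 Weeks" line then
      pvLoopA (some .short) acc rest
    else if PySem.Str.isIn "Long Term" line || PySem.Str.isIn "Next Month" line then
      pvLoopA (some .long) acc rest
    else
      match cur with
      | some tf =>
        if PySem.Str.strip line ≠ "" then
          let task := pvStripFirst (PySem.Str.strip line) pvPrefixes
          if task ≠ "" ∧ ¬ (pvPrefixes.any (fun p => PySem.Str.startswith task p)) then
            pvLoopA (some tf) (pvPush tf task acc) rest
          else pvLoopA (some tf) acc rest
        else pvLoopA (some tf) acc rest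
      | none => pvLoopA none acc rest

-- _yaml_block's walk, specialized EXACTLY to the shape _format_actions_section passes it
-- ({"actions": {tf: {"timeframe": str, "tasks": [{"id": str, "task": str}]}}}); the
-- traversal order and every emitted piece are those of format_value on that data.
def pvTasksYaml (tf : String) (tasks : List String) : String :=
  (PySem.List.enumerate tasks 0).foldl
    (fun o it =>
      o ++ "      - " ++ "id" ++ ": \"" ++ tf ++ "_" ++ PySem.Int.toStr (it.1 + 1) ++ "\"\n"
        ++ "      " ++ "  " ++ "task" ++ ": \"" ++ it.2 ++ "\"\n") ""

def pvYamlBlockA (actionData : List (String × String × List String)) : String :=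
  "<!-- DATA:next-actions:START -->\n```yaml\n"
    ++ "actions:\n"
    ++ actionData.foldl
        (fun o e =>
          o ++ "  " ++ e.1 ++ ":\n"
            ++ "    " ++ "timeframe" ++ ": \"" ++ e.2.1 ++ "\"\n"
            ++ "    " ++ "tasks" ++ ":\n"
            ++ pvTasksYaml e.1 e.2.2) ""
    ++ "```\n<!-- DATA:" ++ "next-actions" ++ ":END -->\n"

def format_actions_section_py (title : String) (content : List String) : String :=
  let result := "\n<!-- SECTION:" ++ "memory:actions" ++ ":START -->\n## " ++ title ++ "\n\n"
  let actions := pvLoopA none ([], [], []) content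
  let result :=
    if actions.1 ≠ [] ∨ actions.2.1 ≠ [] ∨ actions.2.2 ≠ [] then
      -- action_data keeps only the nonempty timeframes, in the dict's fixed key order
      let actionData :=
        (if actions.1 ≠ [] then [("immediate", "This Week", actions.1)] else [])
          ++ (if actions.2.1 ≠ [] then [("short_term", "Next 2 Weeks", actions.2.1)] else [])
          ++ (if actions.2.2 ≠ [] then [("long_term", "Next Month", actions.2.2)] else [])
      result ++ pvYamlBlockA actionData ++ "\n"
    else result
  result ++ PySem.Str.join "\n" content ++ "\n<!-- SECTION:memory:actions:END -->\n"

-- ===== PORT B =====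
def pvClassifyGo (line : String) : List (PvTF × List String) → Option PvTF
  | [] => none
  | (tf, kws) :: rest =>
    if kws.any (fun k => PySem.Str.isIn k line) then some tf else pvClassifyGo line rest

def pvClassifyB (line : String) : Option PvTF :=
  pvClassifyGo line
    [(.imm, ["Immediate", "This Week"]),
     (.short, ["Short Term", "Next 2 Weeks"]),
     (.long, ["Long Term", "Next Month"])]

def pvExtractB (line : String) : Option String :=
  let t := pvStripFirst (PySem.Str.strip line) pvPrefixes
  if t ≠ "" ∧ ¬ (pvPrefixes.any (fun p => PySem.Str.startswith t p)) then some t else none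

-- pass 1: segmentation; state = (finished segments, current open segment)
def pvSegB (fin : List (PvTF × List String)) (cur : Option (PvTF × List String)) :
    List String → List (PvTF × List String)
  | [] => match cur with | some c => fin ++ [c] | none => fin
  | line :: rest =>
    match pvClassifyB line with
    | some tf => pvSegB (match cur with | some c => fin ++ [c] | none => fin) (some (tf, [])) rest
    | none =>
      match cur with
      | some c => pvSegB fin (some (c.1, c.2 ++ [line])) rest
      | none => pvSegB fin none rest

-- pass 2: extract the tasks of one segment into the grouped actions
def pvExtractSeg (acc : List String × List String × List String)
    (seg : PvTF × List String) : List String × List String × List String :=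
  seg.2.foldl
    (fun a l => match pvExtractB l with | some t => pvPush seg.1 t a | none => a) acc

-- B's per-task f-string loop: one append per task item
def pvTasksYamlB (tf : String) (tasks : List String) : String :=
  (PySem.List.enumerate tasks 0).foldl
    (fun o it =>
      o ++ "      - id: \"" ++ tf ++ "_" ++ PySem.Int.toStr (it.1 + 1)
        ++ "\"\n        task: \"" ++ it.2 ++ "\"\n") ""

def format_actions_section_py_alt (title : String) (content : List String) : String :=
  let segments := pvSegB [] none content
  let actions := segments.foldl pvExtractSeg ([], [], [])
  let out := "\n<!-- SECTION:memory:actions:START -->\n## " ++ title ++ "\n\n"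
  let out :=
    if actions.1 ≠ [] ∨ actions.2.1 ≠ [] ∨ actions.2.2 ≠ [] then
      let o := out ++ "<!-- DATA:next-actions:START -->\n```yaml\nactions:\n"
      let o :=
        if actions.1 ≠ [] then
          o ++ "  " ++ "immediate" ++ ":\n"
            ++ "    " ++ "timeframe" ++ ": \"" ++ "This Week" ++ "\"\n"
            ++ "    " ++ "tasks" ++ ":\n" ++ pvTasksYamlB "immediate" actions.1
        else o
      let o :=
        if actions.2.1 ≠ [] then
          o ++ "  " ++ "short_term" ++ ":\n"
            ++ "    " ++ "timeframe" ++ ": \"" ++ "Next 2 Weeks" ++ "\"\n"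
            ++ "    " ++ "tasks" ++ ":\n" ++ pvTasksYamlB "short_term" actions.2.1
        else o
      let o :=
        if actions.2.2 ≠ [] then
          o ++ "  " ++ "long_term" ++ ":\n"
            ++ "    " ++ "timeframe" ++ ": \"" ++ "Next Month" ++ "\"\n"
            ++ "    " ++ "tasks" ++ ":\n" ++ pvTasksYamlB "long_term" actions.2.2
        else o
      o ++ "```\n<!-- DATA:" ++ "next-actions" ++ ":END -->\n" ++ "\n"
    else out
  out ++ PySem.Str.join "\n" content ++ "\n<!-- SECTION:memory:actions:END -->\n"

-- ===== PRECONDITION & SPEC =====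
def Spec_format_actions_section_py (title : String) (content : List String) (out : String) : Prop := out = format_actions_section_py_alt title content
instance (title : String) (content : List String) (out : String) : Decidable (Spec_format_actions_section_py title content out) := by unfold Spec_format_actions_section_py; infer_instance

-- ===== CLAIM (what is proved, stated in full; the proofs are below) =====
def Claim_equal_format_actions_section_py : Prop := ∀ (title : String) (content : List String), Dom_format_actions_section_py title content → Spec_format_actions_section_py title content (format_actions_section_py title content)




-- ===== LEMMAS AND PROOFS =====

-- a blank line (strip = "") extracts nothing, which is why A's extra `line.strip()`
-- truthiness guard never changes the result
theorem pvExtract_blank (line : String) (h : PySem.Str.strip line = "") :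
    pvExtractB line = none := by
  unfold pvExtractB
  rw [h]
  decide

-- B's classifier agrees with A's inline if/elif chain, condition by condition
theorem pvClassify_imm (line : String)
    (c1 : (PySem.Str.isIn "Immediate" line || PySem.Str.isIn "This Week" line) = true) :
    pvClassifyB line = some PvTF.imm := by
  unfold pvClassifyB
  simp only [pvClassifyGo, List.any_cons, List.any_nil, Bool.or_false]
  rw [if_pos c1]

theorem pvClassify_short (line : String)
    (c1 : ¬ (PySem.Str.isIn "Immediate" line || PySem.Str.isIn "This Week" line) = true)
    (c2 : (PySem.Str.isIn "Short Term" line || PySem.Str.isIn "Next 2 Weeks" line) = true) :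
    pvClassifyB line = some PvTF.short := by
  unfold pvClassifyB
  simp only [pvClassifyGo, List.any_cons, List.any_nil, Bool.or_false]
  rw [if_neg c1, if_pos c2]

theorem pvClassify_long (line : String)
    (c1 : ¬ (PySem.Str.isIn "Immediate" line || PySem.Str.isIn "This Week" line) = true)
    (c2 : ¬ (PySem.Str.isIn "Short Term" line || PySem.Str.isIn "Next 2 Weeks" line) = true)
    (c3 : (PySem.Str.isIn "Long Term" line || PySem.Str.isIn "Next Month" line) = true) :
    pvClassifyB line = some PvTF.long := by
  unfold pvClassifyB
  simp only [pvClassifyGo, List.any_cons, List.any_nil, Bool.or_false]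
  rw [if_neg c1, if_neg c2, if_pos c3]

theorem pvClassify_none (line : String)
    (c1 : ¬ (PySem.Str.isIn "Immediate" line || PySem.Str.isIn "This Week" line) = true)
    (c2 : ¬ (PySem.Str.isIn "Short Term" line || PySem.Str.isIn "Next 2 Weeks" line) = true)
    (c3 : ¬ (PySem.Str.isIn "Long Term" line || PySem.Str.isIn "Next Month" line) = true) :
    pvClassifyB line = none := by
  unfold pvClassifyB
  simp only [pvClassifyGo, List.any_cons, List.any_nil, Bool.or_false]
  rw [if_neg c1, if_neg c2, if_neg c3]

-- finished segments prepend
theorem pvSeg_append (ls : List String) :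
    ∀ (fin : List (PvTF × List String)) (cur : Option (PvTF × List String)),
      pvSegB fin cur ls = fin ++ pvSegB [] cur ls := by
  induction ls with
  | nil =>
    intro fin cur
    cases cur <;> simp [pvSegB]
  | cons line rest ih =>
    intro fin cur
    cases hc : pvClassifyB line with
    | some tf =>
      cases cur with
      | none =>
        simp only [pvSegB, hc]
        exact ih fin (some (tf, []))
      | some c =>
        simp only [pvSegB, hc, List.nil_append]
        rw [ih (fin ++ [c]) (some (tf, [])), ih [c] (some (tf, [])), List.append_assoc]
    | none =>
      cases cur with
      | none =>
        simp only [pvSegB, hc]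
        exact ih fin none
      | some c =>
        simp only [pvSegB, hc]
        exact ih fin (some (c.1, c.2 ++ [line]))

theorem pvExtractSeg_snoc (acc : List String × List String × List String) (tf : PvTF)
    (body : List String) (line : String) :
    pvExtractSeg acc (tf, body ++ [line])
      = match pvExtractB line with
        | some t => pvPush tf t (pvExtractSeg acc (tf, body))
        | none => pvExtractSeg acc (tf, body) := by
  unfold pvExtractSeg
  rw [List.foldl_append, List.foldl_cons, List.foldl_nil]

-- the main loop invariant: A's register loop, having already absorbed the body of the
-- currently open segment, equals B's remaining segmentation folded through extraction
set_option maxHeartbeats 4000000 in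
theorem pvMain (ls : List String) :
    ∀ (tf : PvTF) (body : List String) (acc : List String × List String × List String),
      pvLoopA (some tf) (pvExtractSeg acc (tf, body)) ls
        = (pvSegB [] (some (tf, body)) ls).foldl pvExtractSeg acc := by
  induction ls with
  | nil =>
    intro tf body acc
    simp only [pvLoopA, pvSegB, List.nil_append, List.foldl_cons, List.foldl_nil]
  | cons line rest ih =>
    intro tf body acc
    simp only [pvLoopA, pvSegB]
    by_cases c1 : (PySem.Str.isIn "Immediate" line || PySem.Str.isIn "This Week" line) = true
    · rw [if_pos c1]
      simp only [pvClassify_imm line c1, List.nil_append]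
      rw [pvSeg_append rest [(tf, body)] (some (PvTF.imm, [])), List.foldl_append,
        List.foldl_cons, List.foldl_nil]
      exact ih PvTF.imm [] (pvExtractSeg acc (tf, body))
    · rw [if_neg c1]
      by_cases c2 : (PySem.Str.isIn "Short Term" line || PySem.Str.isIn "Next 2 Weeks" line) = true
      · rw [if_pos c2]
        simp only [pvClassify_short line c1 c2, List.nil_append]
        rw [pvSeg_append rest [(tf, body)] (some (PvTF.short, [])), List.foldl_append,
          List.foldl_cons, List.foldl_nil]
        exact ih PvTF.short [] (pvExtractSeg acc (tf, body))
      · rw [if_neg c2]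
        by_cases c3 : (PySem.Str.isIn "Long Term" line || PySem.Str.isIn "Next Month" line) = true
        · rw [if_pos c3]
          simp only [pvClassify_long line c1 c2 c3, List.nil_append]
          rw [pvSeg_append rest [(tf, body)] (some (PvTF.long, [])), List.foldl_append,
            List.foldl_cons, List.foldl_nil]
          exact ih PvTF.long [] (pvExtractSeg acc (tf, body))
        · rw [if_neg c3]
          simp only [pvClassify_none line c1 c2 c3]
          rw [← ih tf (body ++ [line]) acc, pvExtractSeg_snoc]
          by_cases hs : PySem.Str.strip line = ""
          · rw [pvExtract_blank line hs]
            simp [hs]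
          · have he : pvExtractB line
                = if pvStripFirst (PySem.Str.strip line) pvPrefixes ≠ "" ∧
                      ¬ (pvPrefixes.any fun p =>
                          PySem.Str.startswith (pvStripFirst (PySem.Str.strip line) pvPrefixes) p)
                        = true
                  then some (pvStripFirst (PySem.Str.strip line) pvPrefixes) else none := rfl
            rw [he, if_pos hs]
            by_cases hcnd : pvStripFirst (PySem.Str.strip line) pvPrefixes ≠ "" ∧
                ¬ (pvPrefixes.any fun p =>
                    PySem.Str.startswith (pvStripFirst (PySem.Str.strip line) pvPrefixes) p) = true
            · rw [if_pos hcnd]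
              rw [if_pos hcnd]
            · rw [if_neg hcnd]
              rw [if_neg hcnd]

-- before the first header the two sides agree as well (pre-header lines are dropped)
theorem pvMain0 (ls : List String) :
    ∀ (acc : List String × List String × List String),
      pvLoopA none acc ls = (pvSegB [] none ls).foldl pvExtractSeg acc := by
  induction ls with
  | nil => intro acc; simp only [pvLoopA, pvSegB, List.foldl_nil]
  | cons line rest ih =>
    intro acc
    simp only [pvLoopA, pvSegB]
    by_cases c1 : (PySem.Str.isIn "Immediate" line || PySem.Str.isIn "This Week" line) = true
    · rw [if_pos c1]
      simp only [pvClassify_imm line c1]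
      exact pvMain rest PvTF.imm [] acc
    · rw [if_neg c1]
      by_cases c2 : (PySem.Str.isIn "Short Term" line || PySem.Str.isIn "Next 2 Weeks" line) = true
      · rw [if_pos c2]
        simp only [pvClassify_short line c1 c2]
        exact pvMain rest PvTF.short [] acc
      · rw [if_neg c2]
        by_cases c3 : (PySem.Str.isIn "Long Term" line || PySem.Str.isIn "Next Month" line) = true
        · rw [if_pos c3]
          simp only [pvClassify_long line c1 c2 c3]
          exact pvMain rest PvTF.long [] acc
        · rw [if_neg c3]
          simp only [pvClassify_none line c1 c2 c3]
          exact ih acc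

-- the two task-item loops append the same text
set_option maxHeartbeats 4000000 in
theorem pvTasks_eq (tf : String) (tasks : List String) :
    pvTasksYaml tf tasks = pvTasksYamlB tf tasks := by
  unfold pvTasksYaml pvTasksYamlB
  congr 1
  funext o it
  simp only [String.append_assoc]
  rfl

-- ===== VERDICT (by name: the statement is the Claim_ definition above) =====
set_option maxHeartbeats 4000000 in
theorem format_actions_section_py_spec : Claim_equal_format_actions_section_py := by
  intro title content _dom
  show format_actions_section_py title content = format_actions_section_py_alt title content
  simp only [format_actions_section_py, format_actions_section_py_alt]
  rw [← pvMain0 content ([], [], [])]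
  set acts := pvLoopA none ([], [], []) content
  by_cases hg : acts.1 ≠ [] ∨ acts.2.1 ≠ [] ∨ acts.2.2 ≠ []
  · rw [if_pos hg, if_pos hg]
    unfold pvYamlBlockA
    by_cases h1 : acts.1 = [] <;> by_cases h2 : acts.2.1 = [] <;> by_cases h3 : acts.2.2 = [] <;>
      simp only [h1, h2, h3, ne_eq, not_true_eq_false, not_false_eq_true, if_true, if_false,
        List.nil_append, List.append_nil, List.foldl_cons, List.foldl_nil,
        List.cons_append, pvTasks_eq, String.append_assoc] <;>
      rfl
  · rw [if_neg hg, if_neg hg]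
    simp only [String.append_assoc]
    rfl
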